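-- pv_equiv track=rewrite | github.com/suhteevah/job-hunter-mcp | scripts/swarm/mega_pipeline.py | pick_select_value
-- ===== SOURCE A (Python) =====
-- def pick_select_value(label: str, options: list) -> str:
--     ll = label.lower()
--     if "authorized" in ll or "authorization" in ll or "lawfully" in ll or "eligible" in ll:
--         for opt in options:
--             ol = opt.lower()
--             if "do not require" in ol or ("authorized" in ol and "do not" in ol):
--                 return opt
--         for opt in options:
--             if "yes" in opt.lower() and "not" not in opt.lower():
--                 return opt
--     if "sponsor" in ll or "visa" in ll or "immigration" in ll:
--         for opt in options:
--             ol = opt.lower()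
--             if ol == "no" or "will not" in ol or "do not" in ol or "not require" in ol:
--                 return opt
--     if any(kw in ll for kw in ["agree", "privacy", "consent", "acknowledge"]):
--         for opt in options:
--             if any(x in opt.lower() for x in ["agree", "yes", "i agree"]):
--                 return opt
--     if any(kw in ll for kw in ["ml", "machine learning", "ai", "deploy", "production"]):
--         for opt in options:
--             if any(x in opt.lower() for x in ["yes", "personally", "owned", "production"]):
--                 return opt
--         return options[-1] if options else ""
--     if any(kw in ll for kw in ["gender", "race", "veteran", "disability", "ethnicity"]):
--         for opt in options:
--             if "decline" in opt.lower() or "prefer not" in opt.lower():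
--                 return opt
--         return options[-1] if options else ""
--     if any(kw in ll for kw in ["remote", "hybrid", "office", "on-site", "relocation"]):
--         for opt in options:
--             if "yes" in opt.lower():
--                 return opt
--     if any(kw in ll for kw in ["how did you hear", "where did you", "source"]):
--         for opt in options:
--             if any(x in opt.lower() for x in ["job board", "website", "online", "other"]):
--                 return opt
--     return options[0] if options else ""
-- ===== SOURCE B (Python) =====
-- # Score-and-argmin re-implementation: the label first selects a flat, ordered list of
-- # option "phases" (a cascade truncated at the first terminal rule); then ONE pass over the
-- # options scores each by the first phase it satisfies, and the lexicographically smallest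
-- # (phase rank, position) wins -- instead of A's chain of rule-major rescans of the options.
--
-- # clause = (must-contain substrings, must-not-contain substrings, exact-equality text or None)
-- RULES = [
--     (["authorized", "authorization", "lawfully", "eligible"],
--      [[(["do not require"], [], None), (["authorized", "do not"], [], None)],
--       [(["yes"], ["not"], None)]],
--      False),
--     (["sponsor", "visa", "immigration"],
--      [[([], [], "no"), (["will not"], [], None), (["do not"], [], None), (["not require"], [], None)]],
--      False),
--     (["agree", "privacy", "consent", "acknowledge"],
--      [[(["agree"], [], None), (["yes"], [], None), (["i agree"], [], None)]],
--      False),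
--     (["ml", "machine learning", "ai", "deploy", "production"],
--      [[(["yes"], [], None), (["personally"], [], None), (["owned"], [], None), (["production"], [], None)]],
--      True),
--     (["gender", "race", "veteran", "disability", "ethnicity"],
--      [[(["decline"], [], None), (["prefer not"], [], None)]],
--      True),
--     (["remote", "hybrid", "office", "on-site", "relocation"],
--      [[(["yes"], [], None)]],
--      False),
--     (["how did you hear", "where did you", "source"],
--      [[(["job board"], [], None), (["website"], [], None), (["online"], [], None), (["other"], [], None)]],
--      False),
-- ]
--
--
-- def _clause(ol, clause):
--     must, must_not, exact = clause
--     return (all(s in ol for s in must)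
--             and not any(s in ol for s in must_not)
--             and (exact is None or ol == exact))
--
--
-- def _rank(phases, ol):
--     """Index of the first phase (a disjunction of clauses) that ol satisfies, or None."""
--     for r, phase in enumerate(phases):
--         if any(_clause(ol, c) for c in phase):
--             return r
--     return None
--
--
-- def pick_select_value(label: str, options: list) -> str:
--     ll = label.lower()
--     # The label activates a flat priority list of phases; a terminal rule truncates the
--     # cascade and switches the no-match fallback to the last option.
--     phases = []
--     last_fallback = False
--     for kws, rule_phases, terminal in RULES:
--         if any(kw in ll for kw in kws):
--             phases.extend(rule_phases)
--             if terminal: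
--                 last_fallback = True
--                 break
--     # One pass: keep the option whose (phase rank, position) key is smallest.
--     best = None  # (rank, index, option)
--     for i, opt in enumerate(options):
--         r = _rank(phases, opt.lower())
--         if r is not None and (best is None or (r, i) < (best[0], best[1])):
--             best = (r, i, opt)
--     if best is not None:
--         return best[2]
--     if last_fallback:
--         return options[-1] if options else ""
--     return options[0] if options else ""
-- ===== Notes on version B (the rewrite author's own statement) =====
-- stated objective: alternative
-- what changed: Instead of A's cascade of rule-major rescans of the options list, B first flattens the label's matching rules into one priority list of option phases (truncated at the first terminal rule), then makes a single pass over the options scoring each by the first phase it satisfies and returns the option with the lexicographically smallest (phase rank, position) key.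
import Mathlib
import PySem

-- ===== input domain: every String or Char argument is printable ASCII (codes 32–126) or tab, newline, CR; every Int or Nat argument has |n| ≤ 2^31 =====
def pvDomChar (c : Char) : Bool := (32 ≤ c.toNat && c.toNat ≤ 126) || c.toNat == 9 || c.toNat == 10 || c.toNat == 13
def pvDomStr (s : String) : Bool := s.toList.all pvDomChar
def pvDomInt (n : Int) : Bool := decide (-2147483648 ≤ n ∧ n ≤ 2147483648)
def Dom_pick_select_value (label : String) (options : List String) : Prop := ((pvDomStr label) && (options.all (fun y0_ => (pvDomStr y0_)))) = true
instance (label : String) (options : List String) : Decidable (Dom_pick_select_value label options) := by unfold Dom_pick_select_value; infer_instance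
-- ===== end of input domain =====

-- B replaces A's cascade of rule-major rescans of the options by a score-and-argmin pass:
-- the label selects a flat priority list of option phases, one pass scores every option by
-- the first phase it satisfies, and the smallest (rank, position) key wins (objective: alternative).

-- ===== PORT A =====
def aScanAuth1 : List String → Option String
  | [] => none
  | opt :: rest =>
    let ol := PySem.Str.lower opt
    if PySem.Str.isIn "do not require" ol || (PySem.Str.isIn "authorized" ol && PySem.Str.isIn "do not" ol)
    then some opt else aScanAuth1 rest

def aScanAuth2 : List String → Option String
  | [] => none
  | opt :: rest =>
    if PySem.Str.isIn "yes" (PySem.Str.lower opt) && !PySem.Str.isIn "not" (PySem.Str.lower opt)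
    then some opt else aScanAuth2 rest

def aScanSponsor : List String → Option String
  | [] => none
  | opt :: rest =>
    let ol := PySem.Str.lower opt
    if ol == "no" || PySem.Str.isIn "will not" ol || PySem.Str.isIn "do not" ol || PySem.Str.isIn "not require" ol
    then some opt else aScanSponsor rest

def aScanAgree : List String → Option String
  | [] => none
  | opt :: rest =>
    if ["agree", "yes", "i agree"].any (fun x => PySem.Str.isIn x (PySem.Str.lower opt))
    then some opt else aScanAgree rest

def aScanMl : List String → Option String
  | [] => none
  | opt :: rest =>
    if ["yes", "personally", "owned", "production"].any (fun x => PySem.Str.isIn x (PySem.Str.lower opt))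
    then some opt else aScanMl rest

def aScanGender : List String → Option String
  | [] => none
  | opt :: rest =>
    if PySem.Str.isIn "decline" (PySem.Str.lower opt) || PySem.Str.isIn "prefer not" (PySem.Str.lower opt)
    then some opt else aScanGender rest

def aScanRemote : List String → Option String
  | [] => none
  | opt :: rest =>
    if PySem.Str.isIn "yes" (PySem.Str.lower opt) then some opt else aScanRemote rest

def aScanSource : List String → Option String
  | [] => none
  | opt :: rest =>
    if ["job board", "website", "online", "other"].any (fun x => PySem.Str.isIn x (PySem.Str.lower opt))
    then some opt else aScanSource rest

def aDefault (options : List String) : String := (options.head?).getD ""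
def aLast (options : List String) : String := (options.getLast?).getD ""

def aTail7 (ll : String) (options : List String) : String :=
  if ["how did you hear", "where did you", "source"].any (fun kw => PySem.Str.isIn kw ll) then
    match aScanSource options with
    | some o => o
    | none => aDefault options
  else aDefault options

def aTail6 (ll : String) (options : List String) : String :=
  if ["remote", "hybrid", "office", "on-site", "relocation"].any (fun kw => PySem.Str.isIn kw ll) then
    match aScanRemote options with
    | some o => o
    | none => aTail7 ll options
  else aTail7 ll options

def aTail5 (ll : String) (options : List String) : String :=
  if ["gender", "race", "veteran", "disability", "ethnicity"].any (fun kw => PySem.Str.isIn kw ll) then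
    match aScanGender options with
    | some o => o
    | none => aLast options
  else aTail6 ll options

def aTail4 (ll : String) (options : List String) : String :=
  if ["ml", "machine learning", "ai", "deploy", "production"].any (fun kw => PySem.Str.isIn kw ll) then
    match aScanMl options with
    | some o => o
    | none => aLast options
  else aTail5 ll options

def aTail3 (ll : String) (options : List String) : String :=
  if ["agree", "privacy", "consent", "acknowledge"].any (fun kw => PySem.Str.isIn kw ll) then
    match aScanAgree options with
    | some o => o
    | none => aTail4 ll options
  else aTail4 ll options

def aTail2 (ll : String) (options : List String) : String :=
  if PySem.Str.isIn "sponsor" ll || PySem.Str.isIn "visa" ll || PySem.Str.isIn "immigration" ll then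
    match aScanSponsor options with
    | some o => o
    | none => aTail3 ll options
  else aTail3 ll options

def pick_select_value (label : String) (options : List String) : String :=
  let ll := PySem.Str.lower label
  if PySem.Str.isIn "authorized" ll || PySem.Str.isIn "authorization" ll ||
     PySem.Str.isIn "lawfully" ll || PySem.Str.isIn "eligible" ll then
    match aScanAuth1 options with
    | some o => o
    | none =>
      match aScanAuth2 options with
      | some o => o
      | none => aTail2 ll options
  else aTail2 ll options

-- ===== PORT B =====
-- clause = (must-contain substrings, must-not-contain substrings, exact-equality text or none)
abbrev PvClause : Type := List String × List String × Option String
abbrev PvRule : Type := List String × List (List PvClause) × Bool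

def clauseMatches (ol : String) (c : PvClause) : Bool :=
  c.1.all (fun s => PySem.Str.isIn s ol) &&
  !(c.2.1.any (fun s => PySem.Str.isIn s ol)) &&
  (match c.2.2 with | none => true | some e => ol == e)

def pvRules : List PvRule :=
  [ (["authorized", "authorization", "lawfully", "eligible"],
     [[(["do not require"], [], none), (["authorized", "do not"], [], none)],
      [(["yes"], ["not"], none)]],
     false),
    (["sponsor", "visa", "immigration"],
     [[([], [], some "no"), (["will not"], [], none), (["do not"], [], none), (["not require"], [], none)]],
     false),
    (["agree", "privacy", "consent", "acknowledge"],
     [[(["agree"], [], none), (["yes"], [], none), (["i agree"], [], none)]],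
     false),
    (["ml", "machine learning", "ai", "deploy", "production"],
     [[(["yes"], [], none), (["personally"], [], none), (["owned"], [], none), (["production"], [], none)]],
     true),
    (["gender", "race", "veteran", "disability", "ethnicity"],
     [[(["decline"], [], none), (["prefer not"], [], none)]],
     true),
    (["remote", "hybrid", "office", "on-site", "relocation"],
     [[(["yes"], [], none)]],
     false),
    (["how did you hear", "where did you", "source"],
     [[(["job board"], [], none), (["website"], [], none), (["online"], [], none), (["other"], [], none)]],
     false) ]

-- the flat priority list of phases the label activates, and whether a terminal rule
-- truncated the cascade (switching the no-match fallback to the last option)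
def buildActive (ll : String) : List PvRule → List (List PvClause) × Bool
  | [] => ([], false)
  | (kws, phases, term) :: rest =>
    if kws.any (fun kw => PySem.Str.isIn kw ll) then
      if term then (phases, true)
      else
        let p := buildActive ll rest
        (phases ++ p.1, p.2)
    else buildActive ll rest

-- index of the first phase (a disjunction of clauses) that ol satisfies
def bRank (ol : String) : List (List PvClause) → Option Nat
  | [] => none
  | ph :: rest =>
    if ph.any (fun c => clauseMatches ol c) then some 0
    else (bRank ol rest).map (· + 1)

def keyLt (a b : Nat × Int) : Bool := a.1 < b.1 || (a.1 == b.1 && a.2 < b.2)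

-- one step of the single argmin pass: keep the smaller (rank, position) key
def bStep (act : List (List PvClause)) (b : Option (Nat × Int × String)) (p : Int × String) : Option (Nat × Int × String) :=
  match bRank (PySem.Str.lower p.2) act with
  | none => b
  | some r =>
    match b with
    | none => some (r, p.1, p.2)
    | some m => if keyLt (r, p.1) (m.1, m.2.1) then some (r, p.1, p.2) else b

def pick_select_value_alt (label : String) (options : List String) : String :=
  let ll := PySem.Str.lower label
  let act := buildActive ll pvRules
  match (PySem.List.enumerate options).foldl (bStep act.1) none with
  | some m => m.2.2
  | none => if act.2 then (options.getLast?).getD "" else (options.head?).getD ""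

-- ===== PRECONDITION & SPEC =====
def Spec_pick_select_value (label : String) (options : List String) (out : String) : Prop := out = pick_select_value_alt label options
instance (label : String) (options : List String) (out : String) : Decidable (Spec_pick_select_value label options out) := by unfold Spec_pick_select_value; infer_instance

-- ===== CLAIM (what is proved, stated in full; the proofs are below) =====
def Claim_equal_pick_select_value : Prop := ∀ (label : String) (options : List String), Dom_pick_select_value label options → Spec_pick_select_value label options (pick_select_value label options)

-- ===== LEMMAS AND PROOFS =====

-- proof-side intermediate: rule-major sequential search (A's shape, over B's rule table)
def scanPhase (phase : List PvClause) : List String → Option String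
  | [] => none
  | opt :: rest =>
    let ol := PySem.Str.lower opt
    if phase.any (fun c => clauseMatches ol c) then some opt else scanPhase phase rest

def tryPhases (options : List String) : List (List PvClause) → Option String
  | [] => none
  | p :: rest =>
    match scanPhase p options with
    | some o => some o
    | none => tryPhases options rest

def runRules (ll : String) (options : List String) : List PvRule → String
  | [] => (options.head?).getD ""
  | (kws, phases, terminal) :: rest =>
    if kws.any (fun kw => PySem.Str.isIn kw ll) then
      match tryPhases options phases with
      | some o => o
      | none => if terminal then (options.getLast?).getD "" else runRules ll options rest
    else runRules ll options rest

-- proof-side recurrence for the argmin pass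
def bestFrom (act : List (List PvClause)) (i : Int) : List String → Option (Nat × Int × String)
  | [] => none
  | o :: os =>
    let t := bestFrom act (i + 1) os
    match bRank (PySem.Str.lower o) act with
    | none => t
    | some r =>
      some (match t with
            | none => (r, i, o)
            | some m => if keyLt (m.1, m.2.1) (r, i) then m else (r, i, o))

def mergeB (b t : Option (Nat × Int × String)) : Option (Nat × Int × String) :=
  match b, t with
  | none, t => t
  | some bm, none => some bm
  | some bm, some m => if keyLt (m.1, m.2.1) (bm.1, bm.2.1) then some m else some bm

theorem foldl_bStep_eq (act : List (List PvClause)) (os : List String) :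
    ∀ (i : Int) (b : Option (Nat × Int × String)),
      (PySem.List.enumerate os i).foldl (bStep act) b = mergeB b (bestFrom act i os) := by
  induction os with
  | nil => intro i b; cases b <;> simp [PySem.List.enumerate_nil, bestFrom, mergeB]
  | cons o os ih =>
    intro i b
    rw [PySem.List.enumerate_cons, List.foldl_cons, ih]
    simp only [bestFrom, bStep]
    cases hr : bRank (PySem.Str.lower o) act with
    | none => cases b <;> cases bestFrom act (i + 1) os <;> simp [mergeB]
    | some r =>
      cases b with
      | none =>
        cases ht : bestFrom act (i + 1) os <;> simp only [mergeB] <;> (try rfl) <;> split_ifs <;> rfl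
      | some bm =>
        cases ht : bestFrom act (i + 1) os with
        | none => simp only [mergeB]; split_ifs <;> rfl
        | some m =>
          simp only [mergeB]
          split_ifs <;> dsimp only <;> (try rfl) <;> split_ifs <;>
            first
              | rfl
              | (exfalso; simp_all only [keyLt, Bool.or_eq_true, Bool.and_eq_true,
                  decide_eq_true_eq, beq_iff_eq, Bool.not_eq_true, Bool.or_eq_false_iff,
                  Bool.and_eq_false_iff, decide_eq_false_iff_not]; omega)

theorem bestFrom_idx_ge (act : List (List PvClause)) (os : List String) :
    ∀ (i : Int) (m : Nat × Int × String), bestFrom act i os = some m → i ≤ m.2.1 := by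
  induction os with
  | nil => intro i m h; simp [bestFrom] at h
  | cons o os ih =>
    intro i m h
    simp only [bestFrom] at h
    cases hr : bRank (PySem.Str.lower o) act with
    | none =>
      rw [hr] at h
      have := ih (i + 1) m h
      omega
    | some r =>
      rw [hr] at h
      cases ht : bestFrom act (i + 1) os with
      | none =>
        rw [ht] at h
        simp only [Option.some.injEq] at h
        subst h; simp
      | some m' =>
        rw [ht] at h
        simp only [Option.some.injEq] at h
        have hi := ih (i + 1) m' ht
        split_ifs at h <;> subst h <;> simp <;> omega

theorem keyLt_shift' (a1 : Nat) (a2 : Int) (b1 : Nat) (b2 : Int) :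
    keyLt (a1 + 1, a2) (b1 + 1, b2) = keyLt (a1, a2) (b1, b2) := by
  simp [keyLt]

theorem bRank_cons_neg (p : List PvClause) (P : List (List PvClause)) (ol : String)
    (h : (p.any fun c => clauseMatches ol c) = false) :
    bRank ol (p :: P) = (bRank ol P).map (· + 1) := by
  simp [bRank, h]

theorem bestFrom_hit (p : List PvClause) (P : List (List PvClause)) :
    ∀ (os : List String) (o : String) (i : Int), scanPhase p os = some o →
      ∃ j : Int, bestFrom (p :: P) i os = some (0, j, o) := by
  intro os
  induction os with
  | nil => intro o i h; simp [scanPhase] at h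
  | cons o1 os ih =>
    intro o i h
    rw [scanPhase] at h
    by_cases hh : (p.any fun c => clauseMatches (PySem.Str.lower o1) c) = true
    · rw [if_pos hh] at h
      simp only [Option.some.injEq] at h
      subst h
      have hr : bRank (PySem.Str.lower o1) (p :: P) = some 0 := by simp [bRank, hh]
      cases ht : bestFrom (p :: P) (i + 1) os with
      | none => exact ⟨i, by simp [bestFrom, hr, ht]⟩
      | some m =>
        have hi := bestFrom_idx_ge (p :: P) os (i + 1) m ht
        have hk : keyLt (m.1, m.2.1) (0, i) = false := by
          simp only [keyLt, Bool.or_eq_false_iff, Bool.and_eq_false_iff]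
          constructor
          · simp
          · right; simp; omega
        exact ⟨i, by simp [bestFrom, hr, ht, hk]⟩
    · rw [if_neg hh] at h
      obtain ⟨j, hb⟩ := ih o (i + 1) h
      have hr := bRank_cons_neg p P (PySem.Str.lower o1) (by simpa using hh)
      cases hr2 : bRank (PySem.Str.lower o1) P with
      | none => exact ⟨j, by simp [bestFrom, hr, hr2, hb]⟩
      | some r =>
        have hk : keyLt (0, j) (r + 1, i) = true := by simp [keyLt]
        exact ⟨j, by simp [bestFrom, hr, hr2, hb, hk]⟩

theorem bestFrom_shift (p : List PvClause) (P : List (List PvClause)) :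
    ∀ (os : List String) (i : Int), scanPhase p os = none →
      bestFrom (p :: P) i os = (bestFrom P i os).map (fun m => (m.1 + 1, m.2)) := by
  intro os
  induction os with
  | nil => intro i _; simp [bestFrom]
  | cons o1 os ih =>
    intro i h
    rw [scanPhase] at h
    by_cases hh : (p.any fun c => clauseMatches (PySem.Str.lower o1) c) = true
    · rw [if_pos hh] at h; exact absurd h (by simp)
    · rw [if_neg hh] at h
      have hr := bRank_cons_neg p P (PySem.Str.lower o1) (by simpa using hh)
      have hI := ih i.succ h
      cases hr2 : bRank (PySem.Str.lower o1) P with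
      | none =>
        simp only [bestFrom, hr, hr2, Option.map_none]
        rw [show (i + 1 : Int) = i.succ from rfl, hI]
      | some r =>
        simp only [bestFrom, hr, hr2, Option.map_some]
        rw [show (i + 1 : Int) = i.succ from rfl, hI]
        cases hb : bestFrom P i.succ os with
        | none => simp
        | some m => simp [keyLt_shift']; split_ifs <;> rfl

theorem bestFrom_nil_act (os : List String) : ∀ i : Int, bestFrom [] i os = none := by
  induction os with
  | nil => intro i; simp [bestFrom]
  | cons o os ih => intro i; simp [bestFrom, bRank, ih]

theorem bestFrom_append (P : List (List PvClause)) (Q : List (List PvClause)) (os : List String) :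
    ∀ i : Int,
      (bestFrom (P ++ Q) i os).map (·.2.2) =
        match tryPhases os P with
        | some o => some o
        | none => (bestFrom Q i os).map (·.2.2) := by
  induction P with
  | nil => intro i; simp [tryPhases]
  | cons p P' ih =>
    intro i
    cases hs : scanPhase p os with
    | some o1 =>
      obtain ⟨j, hb⟩ := bestFrom_hit p (P' ++ Q) os o1 i hs
      rw [List.cons_append, hb]
      simp [tryPhases, hs]
    | none =>
      rw [List.cons_append, bestFrom_shift p (P' ++ Q) os i hs]
      simp only [tryPhases, hs]
      rw [← ih i]
      cases hb : bestFrom (P' ++ Q) i os <;> simp [hb]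

theorem runRules_eq_best (ll : String) (options : List String) (rules : List PvRule) :
    runRules ll options rules =
      (match bestFrom (buildActive ll rules).1 0 options with
       | some m => m.2.2
       | none => if (buildActive ll rules).2 then (options.getLast?).getD "" else (options.head?).getD "") := by
  induction rules with
  | nil => simp [runRules, buildActive, bestFrom_nil_act]
  | cons r rest ih =>
    obtain ⟨kws, phases, term⟩ := r
    simp only [runRules, buildActive]
    by_cases hk : (kws.any fun kw => PySem.Str.isIn kw ll) = true
    · rw [if_pos hk, if_pos hk]
      cases term with
      | true =>
        simp only [if_pos rfl]
        have hG := bestFrom_append phases [] options 0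
        rw [List.append_nil] at hG
        cases hs : tryPhases options phases with
        | some o1 =>
          rw [hs] at hG
          cases hb : bestFrom phases 0 options <;> rw [hb] at hG <;> simp_all
        | none =>
          rw [hs, bestFrom_nil_act] at hG
          cases hb : bestFrom phases 0 options <;> rw [hb] at hG <;> simp_all
      | false =>
        simp only [Bool.false_eq_true, if_neg (by simp : ¬False)]
        have hG := bestFrom_append phases (buildActive ll rest).1 options 0
        cases hs : tryPhases options phases with
        | some o1 =>
          rw [hs] at hG
          cases hb : bestFrom (phases ++ (buildActive ll rest).1) 0 options <;> rw [hb] at hG <;> simp_all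
        | none =>
          rw [hs] at hG
          rw [ih]
          cases hb : bestFrom (phases ++ (buildActive ll rest).1) 0 options <;>
            cases hb2 : bestFrom (buildActive ll rest).1 0 options <;>
              rw [hb, hb2] at hG <;> simp_all
    · rw [if_neg hk, if_neg hk]
      exact ih

theorem scan_auth1_eq (options : List String) :
    aScanAuth1 options = scanPhase [(["do not require"], [], none), (["authorized", "do not"], [], none)] options := by
  induction options with
  | nil => rfl
  | cons o rest ih =>
    simp [aScanAuth1, scanPhase, clauseMatches, ih]

theorem scan_auth2_eq (options : List String) :
    aScanAuth2 options = scanPhase [(["yes"], ["not"], none)] options := by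
  induction options with
  | nil => rfl
  | cons o rest ih =>
    simp [aScanAuth2, scanPhase, clauseMatches, ih]

theorem scan_sponsor_eq (options : List String) :
    aScanSponsor options = scanPhase [([], [], some "no"), (["will not"], [], none), (["do not"], [], none), (["not require"], [], none)] options := by
  induction options with
  | nil => rfl
  | cons o rest ih =>
    simp [aScanSponsor, scanPhase, clauseMatches, ih]
    split_ifs <;> first | rfl | tauto

theorem scan_agree_eq (options : List String) :
    aScanAgree options = scanPhase [(["agree"], [], none), (["yes"], [], none), (["i agree"], [], none)] options := by
  induction options with
  | nil => rfl
  | cons o rest ih =>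
    simp [aScanAgree, scanPhase, clauseMatches, ih]

theorem scan_ml_eq (options : List String) :
    aScanMl options = scanPhase [(["yes"], [], none), (["personally"], [], none), (["owned"], [], none), (["production"], [], none)] options := by
  induction options with
  | nil => rfl
  | cons o rest ih =>
    simp [aScanMl, scanPhase, clauseMatches, ih]

theorem scan_gender_eq (options : List String) :
    aScanGender options = scanPhase [(["decline"], [], none), (["prefer not"], [], none)] options := by
  induction options with
  | nil => rfl
  | cons o rest ih =>
    simp [aScanGender, scanPhase, clauseMatches, ih]

theorem scan_remote_eq (options : List String) :
    aScanRemote options = scanPhase [(["yes"], [], none)] options := by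
  induction options with
  | nil => rfl
  | cons o rest ih =>
    simp [aScanRemote, scanPhase, clauseMatches, ih]

theorem scan_source_eq (options : List String) :
    aScanSource options = scanPhase [(["job board"], [], none), (["website"], [], none), (["online"], [], none), (["other"], [], none)] options := by
  induction options with
  | nil => rfl
  | cons o rest ih =>
    simp [aScanSource, scanPhase, clauseMatches, ih]

set_option maxHeartbeats 1000000 in
theorem aTail7_eq (ll : String) (options : List String) :
    aTail7 ll options = runRules ll options (pvRules.drop 6) := by
  simp only [aTail7, aDefault, pvRules, List.drop, runRules, tryPhases, scan_source_eq]
  by_cases h : (["how did you hear", "where did you", "source"].any fun kw => PySem.Str.isIn kw ll) = true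
  · simp only [if_pos h]
    cases sp : scanPhase [(["job board"], [], none), (["website"], [], none), (["online"], [], none), (["other"], [], none)] options <;> simp [sp]
  · simp only [if_neg h]

set_option maxHeartbeats 1000000 in
theorem aTail6_eq (ll : String) (options : List String) :
    aTail6 ll options = runRules ll options (pvRules.drop 5) := by
  have hp := aTail7_eq ll options
  simp only [pvRules, List.drop, runRules, tryPhases] at hp
  simp only [aTail6, pvRules, List.drop, runRules, tryPhases, scan_remote_eq]
  by_cases h : (["remote", "hybrid", "office", "on-site", "relocation"].any fun kw => PySem.Str.isIn kw ll) = true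
  · simp only [if_pos h]
    cases sp : scanPhase [(["yes"], [], none)] options <;> simp [sp, hp]
  · simp only [if_neg h]; exact hp

set_option maxHeartbeats 1000000 in
theorem aTail5_eq (ll : String) (options : List String) :
    aTail5 ll options = runRules ll options (pvRules.drop 4) := by
  have hp := aTail6_eq ll options
  simp only [pvRules, List.drop, runRules, tryPhases] at hp
  simp only [aTail5, aLast, pvRules, List.drop, runRules, tryPhases, scan_gender_eq]
  by_cases h : (["gender", "race", "veteran", "disability", "ethnicity"].any fun kw => PySem.Str.isIn kw ll) = true
  · simp only [if_pos h]
    cases sp : scanPhase [(["decline"], [], none), (["prefer not"], [], none)] options <;> simp [sp]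
  · simp only [if_neg h]; exact hp

set_option maxHeartbeats 1000000 in
theorem aTail4_eq (ll : String) (options : List String) :
    aTail4 ll options = runRules ll options (pvRules.drop 3) := by
  have hp := aTail5_eq ll options
  simp only [pvRules, List.drop, runRules, tryPhases] at hp
  simp only [aTail4, aLast, pvRules, List.drop, runRules, tryPhases, scan_ml_eq]
  by_cases h : (["ml", "machine learning", "ai", "deploy", "production"].any fun kw => PySem.Str.isIn kw ll) = true
  · simp only [if_pos h]
    cases sp : scanPhase [(["yes"], [], none), (["personally"], [], none), (["owned"], [], none), (["production"], [], none)] options <;> simp [sp]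
  · simp only [if_neg h]; exact hp

set_option maxHeartbeats 1000000 in
theorem aTail3_eq (ll : String) (options : List String) :
    aTail3 ll options = runRules ll options (pvRules.drop 2) := by
  have hp := aTail4_eq ll options
  simp only [pvRules, List.drop, runRules, tryPhases] at hp
  simp only [aTail3, pvRules, List.drop, runRules, tryPhases, scan_agree_eq]
  by_cases h : (["agree", "privacy", "consent", "acknowledge"].any fun kw => PySem.Str.isIn kw ll) = true
  · simp only [if_pos h]
    cases sp : scanPhase [(["agree"], [], none), (["yes"], [], none), (["i agree"], [], none)] options <;> simp [sp, hp]
  · simp only [if_neg h]; exact hp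

set_option maxHeartbeats 1000000 in
theorem aTail2_eq (ll : String) (options : List String) :
    aTail2 ll options = runRules ll options (pvRules.drop 1) := by
  have hp := aTail3_eq ll options
  simp only [pvRules, List.drop, runRules, tryPhases] at hp
  have hc : (PySem.Str.isIn "sponsor" ll || PySem.Str.isIn "visa" ll || PySem.Str.isIn "immigration" ll)
      = (["sponsor", "visa", "immigration"].any fun kw => PySem.Str.isIn kw ll) := by
    simp [List.any_cons, List.any_nil, Bool.or_assoc]
  simp only [aTail2, pvRules, List.drop, runRules, tryPhases, scan_sponsor_eq, hc]
  by_cases h : ((["sponsor", "visa", "immigration"] : List String).any fun kw => PySem.Str.isIn kw ll) = true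
  · simp only [if_pos h]
    cases sp : scanPhase [([], [], some "no"), (["will not"], [], none), (["do not"], [], none), (["not require"], [], none)] options <;> simp [sp, hp]
  · simp only [if_neg h]; exact hp

set_option maxHeartbeats 1000000 in
theorem pick_eq_runRules (label : String) (options : List String) :
    pick_select_value label options = runRules (PySem.Str.lower label) options pvRules := by
  have hp := aTail2_eq (PySem.Str.lower label) options
  simp only [pvRules, List.drop, runRules, tryPhases] at hp
  have hc : (PySem.Str.isIn "authorized" (PySem.Str.lower label) || PySem.Str.isIn "authorization" (PySem.Str.lower label) ||
      PySem.Str.isIn "lawfully" (PySem.Str.lower label) || PySem.Str.isIn "eligible" (PySem.Str.lower label))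
      = (["authorized", "authorization", "lawfully", "eligible"].any fun kw => PySem.Str.isIn kw (PySem.Str.lower label)) := by
    simp [List.any_cons, List.any_nil, Bool.or_assoc]
  unfold pick_select_value
  simp only [pvRules, runRules, tryPhases, scan_auth1_eq, scan_auth2_eq, hc]
  by_cases h : ((["authorized", "authorization", "lawfully", "eligible"] : List String).any fun kw => PySem.Str.isIn kw (PySem.Str.lower label)) = true
  · simp only [if_pos h]
    cases s1 : scanPhase [(["do not require"], [], none), (["authorized", "do not"], [], none)] options
    · cases s2 : scanPhase [(["yes"], ["not"], none)] options <;> simp [s1, s2, hp]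
    · simp [s1]
  · simp only [if_neg h]; exact hp

-- ===== VERDICT (by name: the statement is the Claim_ definition above) =====
theorem pick_select_value_spec : Claim_equal_pick_select_value := by
  intro label options _
  unfold Spec_pick_select_value pick_select_value_alt
  rw [pick_eq_runRules, runRules_eq_best]
  simp only [foldl_bStep_eq, mergeB]
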